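-- pv_equiv track=rewrite | github.com/facebookresearch/gismo | inv_cooking/datasets/recipe1m/preprocess_comments.py | find_distance_to_substitution
-- ===== SOURCE A (Python) =====
-- def find_distance_to_substitution(text, ingredient_words, substitution_terms):
--     text = text.strip()
--     indices_subs = []
--     indices_ing = []
--     for term in substitution_terms:
--         if term in text:
--             res = [i for i in range(len(text)) if text.startswith(term, i)]
--             indices_subs += res
--     for ing in ingredient_words:
--         res = [i for i in range(len(text)) if text.startswith(ing, i)]
--         indices_ing += res
--     for ind1 in indices_subs:
--         for ind2 in indices_ing:
--             if len(text[min(ind1, ind2) : max(ind1, ind2)].split()) < 7: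
--                 return True
--     return False
-- ===== SOURCE B (Python) =====
-- def find_distance_to_substitution(text, ingredient_words, substitution_terms):
--     text = text.strip()
--     n = len(text)
--     # prefix word counts: W[i] = number of words starting strictly before position i
--     W = [0]
--     acc = 0
--     prev_space = True
--     for c in text:
--         if (not c.isspace()) and prev_space:
--             acc += 1
--         W.append(acc)
--         prev_space = c.isspace()
--
--     def glue(l):
--         # 1 if a word continues across position l (cutting there exposes an extra word start)
--         return 1 if 0 < l < n and not text[l].isspace() and not text[l - 1].isspace() else 0
--
--     def occurrences(term):
--         res, start = [], 0
--         while start <= n: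
--             k = text.find(term, start)
--             if k < 0 or k >= n:
--                 break
--             res.append(k)
--             start = k + 1
--         return res
--
--     subs_pos = sorted({p for t in substitution_terms for p in occurrences(t)})
--     ing_pos = sorted({p for w in ingredient_words for p in occurrences(w)})
--
--     def close_pair(los, his):
--         # exists l in los, h in his with l <= h and W[h] - (W[l] - glue(l)) < 7 ?
--         best = None
--         j = 0
--         for h in his:
--             while j < len(los) and los[j] <= h:
--                 v = W[los[j]] - glue(los[j])
--                 if best is None or v > best:
--                     best = v
--                 j += 1
--             if best is not None and W[h] - best < 7:
--                 return True
--         return False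
--
--     return close_pair(subs_pos, ing_pos) or close_pair(ing_pos, subs_pos)
-- ===== Notes on version B (the rewrite author's own statement) =====
-- stated objective: faster
-- what changed: Replaces per-pair substring slicing + split (O(S*I*len)) by a prefix word-count array built in one pass, str.find-based occurrence scanning instead of startswith at every index, and a sorted-positions two-pointer sweep with a running maximum that decides the existence of a close pair without examining every pair.
import Mathlib
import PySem

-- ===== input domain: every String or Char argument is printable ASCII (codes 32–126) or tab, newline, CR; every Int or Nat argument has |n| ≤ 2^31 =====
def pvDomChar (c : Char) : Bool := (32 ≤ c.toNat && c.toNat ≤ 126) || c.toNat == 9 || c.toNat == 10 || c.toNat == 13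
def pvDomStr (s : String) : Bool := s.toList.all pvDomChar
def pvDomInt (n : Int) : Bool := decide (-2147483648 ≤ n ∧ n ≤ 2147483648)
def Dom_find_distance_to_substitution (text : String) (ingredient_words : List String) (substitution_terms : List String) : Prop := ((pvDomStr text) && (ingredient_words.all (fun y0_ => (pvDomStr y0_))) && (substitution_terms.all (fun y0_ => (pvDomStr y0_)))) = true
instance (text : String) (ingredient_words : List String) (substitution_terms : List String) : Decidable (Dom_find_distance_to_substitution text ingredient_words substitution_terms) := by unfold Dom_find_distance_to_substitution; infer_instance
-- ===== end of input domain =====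

-- B replaces A's per-pair substring slicing + split() by a prefix word-count array,
-- find-based occurrence scanning and a sorted-positions two-pointer sweep (return value only; no mutation).

-- ===== PORT A =====
-- text.startswith(term, i): term occurs at offset i (exact for the 0 ≤ i produced by range(len(text)))
def pvStartsAt (cs : List Char) (term : List Char) (i : Int) : Bool :=
  PySem.Chars.startswith (cs.drop i.toNat) term

def find_distance_to_substitution (text : String) (ingredient_words : List String) (substitution_terms : List String) : Bool :=
  let cs := PySem.Chars.strip text.toList
  let indices_subs :=
    substitution_terms.foldl (fun acc term =>
      if PySem.Chars.isIn term.toList cs then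
        acc ++ (PySem.List.pyRange 0 (cs.length : Int) 1).filter (fun i => pvStartsAt cs term.toList i)
      else acc) []
  let indices_ing :=
    ingredient_words.foldl (fun acc ing =>
      acc ++ (PySem.List.pyRange 0 (cs.length : Int) 1).filter (fun i => pvStartsAt cs ing.toList i)) []
  indices_subs.any (fun ind1 => indices_ing.any (fun ind2 =>
    (PySem.Chars.split₀ (PySem.List.slice cs (some (min ind1 ind2)) (some (max ind1 ind2)))).length < 7))

-- ===== PORT B =====
-- prefix word counts: (pvW cs)[i] = number of words starting strictly before position i
def pvBuildW (prevSpace : Bool) (acc : Nat) : List Char → List Nat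
  | [] => []
  | c :: rest =>
      let acc' := if (!PySem.Chars.isspace c) && prevSpace then acc + 1 else acc
      acc' :: pvBuildW (PySem.Chars.isspace c) acc' rest

def pvW (cs : List Char) : List Nat := 0 :: pvBuildW true 0 cs

-- 1 if a word continues across position l (cutting there exposes an extra word start)
def pvGlue (cs : List Char) (l : Nat) : Int :=
  if 0 < l ∧ l < cs.length ∧ ¬(PySem.Chars.isspace (cs.getD l ' ') = true) ∧ ¬(PySem.Chars.isspace (cs.getD (l - 1) ' ') = true)
  then 1 else 0

-- the text.find(term, start) loop of B's occurrences()
def pvOccsGo (cs term : List Char) (start : Nat) : List Nat :=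
  if hle : start ≤ cs.length then
    let k := PySem.Chars.findFrom cs term (start : Int) none
    if k < 0 ∨ (cs.length : Int) ≤ k then []
    else k.toNat :: pvOccsGo cs term (k.toNat + 1)
  else []
termination_by cs.length + 1 - start
decreasing_by
  have hne : PySem.Chars.findFrom cs term (start : Int) none ≠ -1 := by omega
  have hs := (PySem.Chars.findFrom_natCast_spec cs term start hle hne).1
  omega

-- inner while loop of close_pair: consume los-elements ≤ h, keeping the best value
def pvAdvance (W : List Nat) (cs : List Char) (h : Nat) : List Nat → Option Int → Option Int × List Nat
  | [], best => (best, [])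
  | l :: ls, best =>
      if l ≤ h then
        let v : Int := (W.getD l 0 : Int) - pvGlue cs l
        pvAdvance W cs h ls (match best with
          | none => some v
          | some b => some (if b < v then v else b))
      else (best, l :: ls)

def pvCloseGo (W : List Nat) (cs : List Char) : List Nat → Option Int → List Nat → Bool
  | _, _, [] => false
  | los, best, h :: his =>
      let r := pvAdvance W cs h los best
      if (match r.1 with
          | some b => decide ((W.getD h 0 : Int) - b < 7)
          | none => false) then true
      else pvCloseGo W cs r.2 r.1 his

def pvClosePair (W : List Nat) (cs : List Char) (los his : List Nat) : Bool :=
  pvCloseGo W cs los none his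

def find_distance_to_substitution_alt (text : String) (ingredient_words : List String) (substitution_terms : List String) : Bool :=
  let cs := PySem.Chars.strip text.toList
  let W := pvW cs
  let subs_pos := PySem.List.sorted (PySem.Set.ofList (substitution_terms.flatMap (fun t => pvOccsGo cs t.toList 0))) (fun x => x) false
  let ing_pos := PySem.List.sorted (PySem.Set.ofList (ingredient_words.flatMap (fun w => pvOccsGo cs w.toList 0))) (fun x => x) false
  pvClosePair W cs subs_pos ing_pos || pvClosePair W cs ing_pos subs_pos

-- ===== PRECONDITION & SPEC =====
def Spec_find_distance_to_substitution (text : String) (ingredient_words : List String) (substitution_terms : List String) (out : Bool) : Prop := out = find_distance_to_substitution_alt text ingredient_words substitution_terms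
instance (text : String) (ingredient_words : List String) (substitution_terms : List String) (out : Bool) : Decidable (Spec_find_distance_to_substitution text ingredient_words substitution_terms out) := by unfold Spec_find_distance_to_substitution; infer_instance

-- ===== CLAIM (what is proved, stated in full; the proofs are below) =====
def Claim_equal_find_distance_to_substitution : Prop := ∀ (text : String) (ingredient_words : List String) (substitution_terms : List String), Dom_find_distance_to_substitution text ingredient_words substitution_terms → Spec_find_distance_to_substitution text ingredient_words substitution_terms (find_distance_to_substitution text ingredient_words substitution_terms)

-- ===== LEMMAS AND PROOFS =====

-- number of word starts in a char list, given whether the previous char was non-space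
def pvTok (prevNS : Bool) : List Char → Nat
  | [] => 0
  | c :: rest => (if (!PySem.Chars.isspace c) && !prevNS then 1 else 0) + pvTok (!PySem.Chars.isspace c) rest

-- W as a function of the prefix
def pvWf (cs : List Char) (i : Nat) : Nat := pvTok false (cs.take i)

-- the per-pair condition B evaluates, as a proposition over Nat positions
def pvQ (cs : List Char) (l h : Nat) : Prop :=
  ((pvWf cs h : Int) - ((pvWf cs l : Int) - pvGlue cs l)) < 7

-- "some word of `words` occurs at position p of cs"
def pvOccP (cs : List Char) (words : List String) (p : Nat) : Prop :=
  ∃ t ∈ words, p < cs.length ∧ t.toList <+: cs.drop p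

theorem pvTok_append (p : Bool) (xs ys : List Char) :
    pvTok p (xs ++ ys) = pvTok p xs + pvTok ((xs.getLast?.map (fun c => !PySem.Chars.isspace c)).getD p) ys := by
  induction xs generalizing p with
  | nil => simp [pvTok]
  | cons c xs ih =>
      cases xs with
      | nil => simp [pvTok]
      | cons d xs =>
          have h1 : pvTok p (c :: (d :: xs) ++ ys)
              = (if (!PySem.Chars.isspace c) && !p then 1 else 0) + pvTok (!PySem.Chars.isspace c) ((d :: xs) ++ ys) := rfl
          have h2 : pvTok p (c :: d :: xs)
              = (if (!PySem.Chars.isspace c) && !p then 1 else 0) + pvTok (!PySem.Chars.isspace c) (d :: xs) := rfl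
          rcases hl : (d :: xs).getLast? with _ | a
          · simp at hl
          · rw [h1, h2, ih, List.getLast?_cons_cons, hl]; simp; omega

theorem pvTok_true_eq (l : List Char) :
    pvTok false l = pvTok true l + (if (l.head?.map (fun c => !PySem.Chars.isspace c)).getD false then 1 else 0) := by
  cases l with
  | nil => simp [pvTok]
  | cons c rest => cases h : PySem.Chars.isspace c <;> simp [pvTok, h]; omega

theorem pvGlue_bounds (cs : List Char) (l : Nat) : 0 ≤ pvGlue cs l ∧ pvGlue cs l ≤ 1 := by
  unfold pvGlue; split <;> simp

theorem split₀_go_length (cs : List Char) (cur : List Char) (acc : List (List Char)) :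
    (PySem.Chars.split₀.go cs cur acc).length = acc.length + (if cur.isEmpty then 0 else 1) + pvTok (!cur.isEmpty) cs := by
  induction cs generalizing cur acc with
  | nil =>
      by_cases hc : cur.isEmpty = true <;> simp [PySem.Chars.split₀.go, pvTok, hc]
  | cons c rest ih =>
      by_cases hs : PySem.Chars.isspace c = true
      · by_cases hc : cur.isEmpty = true
        · rw [show PySem.Chars.split₀.go (c::rest) cur acc = PySem.Chars.split₀.go rest [] acc from by
            simp [PySem.Chars.split₀.go, hs, hc]]
          simp [ih, pvTok, hs, hc]
        · rw [show PySem.Chars.split₀.go (c::rest) cur acc = PySem.Chars.split₀.go rest [] (cur.reverse :: acc) from by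
            simp [PySem.Chars.split₀.go, hs, hc]]
          simp [ih, pvTok, hs, hc]
      · rw [show PySem.Chars.split₀.go (c::rest) cur acc = PySem.Chars.split₀.go rest (c::cur) acc from by
          simp [PySem.Chars.split₀.go, hs]]
        by_cases hc : cur.isEmpty = true <;> simp [ih, pvTok, hs, hc] <;> omega

theorem split₀_length (cs : List Char) : (PySem.Chars.split₀ cs).length = pvTok false cs := by
  have := split₀_go_length cs [] []
  simpa [PySem.Chars.split₀] using this

theorem pvBuildW_getD (cs : List Char) (prevNS : Bool) (acc j : Nat) (hj : j < cs.length) :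
    (pvBuildW (!prevNS) acc cs).getD j 0 = acc + pvTok prevNS (cs.take (j + 1)) := by
  induction cs generalizing prevNS acc j with
  | nil => simp at hj
  | cons c rest ih =>
      cases j with
      | zero =>
          by_cases h : (PySem.Chars.isspace c = false ∧ prevNS = false) <;>
            simp [pvBuildW, pvTok, h]
      | succ j =>
          simp only [List.length_cons] at hj
          have := ih (!PySem.Chars.isspace c) (if (!PySem.Chars.isspace c) && !prevNS then acc + 1 else acc) j (by omega)
          simp only [Bool.not_not] at this
          by_cases h : (PySem.Chars.isspace c = false ∧ prevNS = false)
          · simp [pvBuildW, pvTok, h] at this ⊢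
            rw [this]; omega
          · simp [pvBuildW, pvTok, h] at this ⊢
            rw [this]

theorem pvW_getD (cs : List Char) (i : Nat) (hi : i ≤ cs.length) :
    (pvW cs).getD i 0 = pvWf cs i := by
  cases i with
  | zero => simp [pvW, pvWf, pvTok]
  | succ i =>
      have := pvBuildW_getD cs false 0 i (by omega)
      simpa [pvW, pvWf] using this

theorem tokens_slice (cs : List Char) (lo hi : Nat) (hlo : lo < hi) (hhi : hi ≤ cs.length) :
    ((PySem.Chars.split₀ ((cs.drop lo).take (hi - lo))).length : Int)
      = (pvWf cs hi : Int) - (pvWf cs lo : Int) + pvGlue cs lo := by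
  have hlon : lo < cs.length := by omega
  have hseg : cs.take hi = cs.take lo ++ (cs.drop lo).take (hi - lo) := by
    rw [← List.take_add]; congr 1; omega
  have h1 : pvWf cs hi = pvWf cs lo
      + pvTok (((cs.take lo).getLast?.map (fun c => !PySem.Chars.isspace c)).getD false) ((cs.drop lo).take (hi - lo)) := by
    unfold pvWf; rw [hseg, pvTok_append]
  have hhead : ((cs.drop lo).take (hi - lo)).head? = some cs[lo] := by
    cases hd : (cs.drop lo) with
    | nil => simp [List.drop_eq_nil_iff] at hd; omega
    | cons a rest =>
        have : a = cs[lo] := by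
          have hhd : (List.drop lo cs).head? = cs[lo]? := List.head?_drop
          rw [hd] at hhd
          simp [List.getElem?_eq_getElem hlon] at hhd
          exact hhd
        cases h' : hi - lo with
        | zero => omega
        | succ m => simp [this]
  rw [split₀_length]
  by_cases h0 : lo = 0
  · subst h0
    simp only [List.take_zero, List.getLast?_nil, Option.map_none, Option.getD_none] at h1
    have hg : pvGlue cs 0 = 0 := by unfold pvGlue; simp
    rw [h1, hg]; push_cast; ring
  · have hlast : (cs.take lo).getLast? = some cs[lo - 1] := by
      rw [List.getLast?_eq_getElem?]
      have hlen : (cs.take lo).length = lo := by simp; omega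
      rw [hlen, List.getElem?_take, if_pos (by omega)]
      simp [List.getElem?_eq_getElem (show lo - 1 < cs.length by omega)]
    rw [hlast] at h1
    simp only [Option.map_some, Option.getD_some] at h1
    by_cases hprev : PySem.Chars.isspace cs[lo - 1] = true
    · have hg : pvGlue cs lo = 0 := by
        unfold pvGlue; rw [if_neg]
        rintro ⟨-, -, -, h4⟩
        rw [List.getD_eq_getElem?_getD, List.getElem?_eq_getElem (show lo - 1 < cs.length by omega)] at h4
        exact h4 hprev
      rw [hg, h1]
      simp [hprev]
    · have h2 := pvTok_true_eq ((cs.drop lo).take (hi - lo))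
      rw [hhead] at h2
      simp only [Option.map_some, Option.getD_some] at h2
      have hg : pvGlue cs lo = if (!PySem.Chars.isspace cs[lo]) then 1 else 0 := by
        unfold pvGlue
        simp only [List.getD_eq_getElem?_getD, List.getElem?_eq_getElem hlon,
          List.getElem?_eq_getElem (show lo - 1 < cs.length by omega), Option.getD_some]
        by_cases hcur : PySem.Chars.isspace cs[lo] = true
        · rw [if_neg (by tauto), if_neg (by simp [hcur])]
        · rw [if_pos ⟨by omega, hlon, hcur, hprev⟩, if_pos (by simp [hcur])]
      rw [h2, h1]
      simp only [hprev, Bool.not_eq_true, Bool.not_false] at *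
      rw [hg]
      by_cases hcur : PySem.Chars.isspace cs[lo] = true <;> simp [hcur]

theorem cond_iff_Q (cs : List Char) (lo hi : Nat) (hle : lo ≤ hi) (hhi : hi ≤ cs.length) :
    ((PySem.Chars.split₀ ((cs.drop lo).take (hi - lo))).length < 7 ↔ pvQ cs lo hi) := by
  rcases Nat.eq_or_lt_of_le hle with heq | hlt
  · subst heq
    have hg := pvGlue_bounds cs lo
    simp only [Nat.sub_self, List.take_zero, pvQ]
    rw [show PySem.Chars.split₀ ([] : List Char) = [] from rfl]
    simp; omega
  · have h := tokens_slice cs lo hi hlt hhi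
    unfold pvQ; omega

theorem prefix_drop_infix {term cs : List Char} {p j : Nat} (hj : j ≤ p)
    (h : term <+: cs.drop p) : term <:+: cs.drop j := by
  have : cs.drop p = (cs.drop j).drop (p - j) := by rw [List.drop_drop]; congr 1; omega
  rw [this] at h
  exact h.isInfix.trans (List.drop_suffix _ _).isInfix

theorem mem_pvOccsGo (cs term : List Char) (start : Nat) (p : Nat) :
    p ∈ pvOccsGo cs term start ↔ start ≤ p ∧ p < cs.length ∧ term <+: cs.drop p := by
  rw [pvOccsGo]
  by_cases hle : start ≤ cs.length
  · simp only [dif_pos hle]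
    by_cases hbrk : PySem.Chars.findFrom cs term (start : Int) none < 0 ∨
        (cs.length : Int) ≤ PySem.Chars.findFrom cs term (start : Int) none
    · simp only [if_pos hbrk, List.not_mem_nil, false_iff]
      rintro ⟨h1, h2, h3⟩
      by_cases hne : PySem.Chars.findFrom cs term (start : Int) none = -1
      · rw [PySem.Chars.findFrom_natCast_eq_neg_one_iff cs term start hle] at hne
        exact hne (prefix_drop_infix h1 h3)
      · obtain ⟨hk1, hk2, hk3⟩ := PySem.Chars.findFrom_natCast_spec cs term start hle hne
        rcases hbrk with hneg | hbig
        · omega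
        · have hdrop : cs.drop (PySem.Chars.findFrom cs term (start : Int) none).toNat = [] := by
            apply List.drop_eq_nil_of_le; omega
          rw [hdrop] at hk2
          have hterm : term = [] := List.prefix_nil.mp hk2
          have : ¬ (start < (PySem.Chars.findFrom cs term (start : Int) none).toNat) := by
            intro hlt
            refine hk3 start le_rfl hlt ?_
            rw [hterm]; exact List.nil_prefix
          omega
    · simp only [if_neg hbrk]
      have hne : PySem.Chars.findFrom cs term (start : Int) none ≠ -1 := by omega
      obtain ⟨hk1, hk2, hk3⟩ := PySem.Chars.findFrom_natCast_spec cs term start hle hne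
      rw [List.mem_cons, mem_pvOccsGo]
      constructor
      · rintro (rfl | ⟨h1, h2, h3⟩)
        · exact ⟨by omega, by omega, hk2⟩
        · exact ⟨by omega, h2, h3⟩
      · rintro ⟨h1, h2, h3⟩
        by_cases hp : p = (PySem.Chars.findFrom cs term (start : Int) none).toNat
        · exact Or.inl hp
        · right
          refine ⟨?_, h2, h3⟩
          by_contra hlt
          exact hk3 p h1 (by omega) h3
  · simp only [dif_neg hle, List.not_mem_nil, false_iff]
    rintro ⟨h1, h2, h3⟩; omega
termination_by cs.length + 1 - start
decreasing_by
  omega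

theorem pvAdvance_spec (W : List Nat) (cs : List Char) (h : Nat) (los : List Nat) (best : Option Int)
    (hsort : los.Pairwise (· ≤ ·)) :
    (∀ t : Int, (∃ b, (pvAdvance W cs h los best).1 = some b ∧ t < b) ↔
        ((∃ b, best = some b ∧ t < b) ∨ ∃ l ∈ los, l ≤ h ∧ t < (W.getD l 0 : Int) - pvGlue cs l)) ∧
    (∃ pre, los = pre ++ (pvAdvance W cs h los best).2 ∧ (∀ l ∈ pre, l ≤ h)) := by
  induction los generalizing best with
  | nil =>
      refine ⟨fun t => ?_, ⟨[], by simp [pvAdvance]⟩⟩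
      simp [pvAdvance]
  | cons l ls ih =>
      rw [List.pairwise_cons] at hsort
      obtain ⟨hfst, hrest⟩ := hsort
      by_cases hlh : l ≤ h
      · obtain ⟨nb, heq, hmax⟩ : ∃ nb : Option Int,
            pvAdvance W cs h (l :: ls) best = pvAdvance W cs h ls nb ∧
            ∀ t : Int, ((∃ b, nb = some b ∧ t < b) ↔
              ((∃ b, best = some b ∧ t < b) ∨ t < ((W.getD l 0 : Int) - pvGlue cs l))) := by
          cases best with
          | none =>
              refine ⟨some ((W.getD l 0 : Int) - pvGlue cs l), ?_, by simp⟩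
              conv_lhs => rw [pvAdvance]
              rw [if_pos hlh]
          | some b0 =>
              refine ⟨some (if b0 < (W.getD l 0 : Int) - pvGlue cs l then (W.getD l 0 : Int) - pvGlue cs l else b0), ?_, ?_⟩
              · conv_lhs => rw [pvAdvance]
                rw [if_pos hlh]
              · intro t
                constructor
                · rintro ⟨b, hb, htb⟩
                  rw [Option.some.injEq] at hb; subst hb
                  by_cases hcmp : b0 < (W.getD l 0 : Int) - pvGlue cs l
                  · rw [if_pos hcmp] at htb; right; exact htb
                  · rw [if_neg hcmp] at htb; left; exact ⟨b0, rfl, htb⟩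
                · rintro (⟨b, hb, htb⟩ | hv')
                  · rw [Option.some.injEq] at hb; subst hb
                    refine ⟨_, rfl, ?_⟩
                    by_cases hcmp : b0 < (W.getD l 0 : Int) - pvGlue cs l
                    · rw [if_pos hcmp]; omega
                    · rw [if_neg hcmp]; omega
                  · refine ⟨_, rfl, ?_⟩
                    by_cases hcmp : b0 < (W.getD l 0 : Int) - pvGlue cs l
                    · rw [if_pos hcmp]; omega
                    · rw [if_neg hcmp]; omega
        rw [heq]
        obtain ⟨ih1, pre, hpre1, hpre2⟩ := ih nb hrest
        refine ⟨fun t => ?_, ⟨l :: pre, by rw [List.cons_append, ← hpre1], ?_⟩⟩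
        · rw [ih1 t, hmax t]
          constructor
          · rintro ((hb | hv') | ⟨l', hl', hlh', hv'⟩)
            · exact Or.inl hb
            · exact Or.inr ⟨l, by simp, hlh, hv'⟩
            · exact Or.inr ⟨l', by simp [hl'], hlh', hv'⟩
          · rintro (hb | ⟨l', hl', hlh', hv'⟩)
            · exact Or.inl (Or.inl hb)
            · rcases List.mem_cons.mp hl' with rfl | hmem
              · exact Or.inl (Or.inr hv')
              · exact Or.inr ⟨l', hmem, hlh', hv'⟩
        · intro x hx
          rcases List.mem_cons.mp hx with rfl | hm
          · exact hlh
          · exact hpre2 x hm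
      · have heq : pvAdvance W cs h (l :: ls) best = (best, l :: ls) := by
          unfold pvAdvance; rw [if_neg hlh]
        rw [heq]
        refine ⟨fun t => ?_, ⟨[], by simp⟩⟩
        simp only
        constructor
        · exact Or.inl
        · rintro (hb | ⟨l', hl', hlh', hv'⟩)
          · exact hb
          · exfalso
            rcases List.mem_cons.mp hl' with rfl | hmem
            · exact hlh hlh'
            · exact hlh (le_trans (hfst l' hmem) hlh')

theorem pvHit_iff (W : List Nat) (h : Nat) (r : Option Int) :
    ((match r with
      | some b => decide ((W.getD h 0 : Int) - b < 7)
      | none => false) = true) ↔ ∃ b, r = some b ∧ (W.getD h 0 : Int) - 7 < b := by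
  cases r with
  | none => simp
  | some b =>
      simp only [decide_eq_true_iff, Option.some.injEq]
      constructor
      · intro hb; exact ⟨b, rfl, by omega⟩
      · rintro ⟨b', rfl, hb⟩; omega

theorem pvCloseGo_spec (W : List Nat) (cs : List Char) (los : List Nat) (best : Option Int) (his : List Nat)
    (hlos : los.Pairwise (· ≤ ·)) (hhis : his.Pairwise (· ≤ ·)) :
    (pvCloseGo W cs los best his = true ↔
      ∃ h ∈ his, (∃ b, best = some b ∧ (W.getD h 0 : Int) - b < 7) ∨
        ∃ l ∈ los, l ≤ h ∧ (W.getD h 0 : Int) - ((W.getD l 0 : Int) - pvGlue cs l) < 7) := by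
  induction his generalizing los best with
  | nil => simp [pvCloseGo]
  | cons h his ih =>
      rw [List.pairwise_cons] at hhis
      obtain ⟨hh, hhis'⟩ := hhis
      obtain ⟨ha, pre, hpre1, hpre2⟩ := pvAdvance_spec W cs h los best hlos
      have hlos' : (pvAdvance W cs h los best).2.Pairwise (· ≤ ·) := by
        rw [hpre1] at hlos
        exact hlos.sublist (List.sublist_append_right pre _)
      have hunf : pvCloseGo W cs los best (h :: his)
          = (if (match (pvAdvance W cs h los best).1 with
              | some b => decide ((W.getD h 0 : Int) - b < 7)
              | none => false) then true
            else pvCloseGo W cs (pvAdvance W cs h los best).2 (pvAdvance W cs h los best).1 his) := rfl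
      rw [hunf]
      by_cases hhit : (match (pvAdvance W cs h los best).1 with
              | some b => decide ((W.getD h 0 : Int) - b < 7)
              | none => false) = true
      · rw [if_pos hhit]
        rw [pvHit_iff W h _] at hhit
        rw [ha ((W.getD h 0 : Int) - 7)] at hhit
        simp only [true_iff]
        refine ⟨h, by simp, ?_⟩
        rcases hhit with ⟨b, hb, htb⟩ | ⟨l, hl, hlh, hv⟩
        · exact Or.inl ⟨b, hb, by omega⟩
        · exact Or.inr ⟨l, hl, hlh, by omega⟩
      · rw [if_neg hhit]
        rw [ih _ _ hlos' hhis']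
        constructor
        · rintro ⟨h', hh', hcase⟩
          refine ⟨h', by simp [hh'], ?_⟩
          rcases hcase with ⟨b, hb, htb⟩ | ⟨l, hl, hlh', hv⟩
          · have : ∃ b, (pvAdvance W cs h los best).1 = some b ∧ (W.getD h' 0 : Int) - 7 < b :=
              ⟨b, hb, by omega⟩
            rw [ha] at this
            rcases this with ⟨b0, hb0, ht0⟩ | ⟨l, hl, hlh', hv⟩
            · exact Or.inl ⟨b0, hb0, by omega⟩
            · exact Or.inr ⟨l, hl, le_trans hlh' (hh h' hh'), by omega⟩
          · refine Or.inr ⟨l, ?_, hlh', hv⟩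
            rw [hpre1]; exact List.mem_append_right _ hl
        · rintro ⟨h', hh', hcase⟩
          rcases List.mem_cons.mp hh' with rfl | hmem
          · exfalso
            apply hhit
            rw [pvHit_iff, ha]
            rcases hcase with ⟨b, hb, htb⟩ | ⟨l, hl, hlh', hv⟩
            · exact Or.inl ⟨b, hb, by omega⟩
            · exact Or.inr ⟨l, hl, hlh', by omega⟩
          · refine ⟨h', hmem, ?_⟩
            rcases hcase with ⟨b, hb, htb⟩ | ⟨l, hl, hlh', hv⟩
            · have : ∃ b, (pvAdvance W cs h los best).1 = some b ∧ (W.getD h' 0 : Int) - 7 < b := by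
                rw [ha]; exact Or.inl ⟨b, hb, by omega⟩
              rcases this with ⟨b0, hb0, ht0⟩
              exact Or.inl ⟨b0, hb0, by omega⟩
            · rw [hpre1] at hl
              rcases List.mem_append.mp hl with hlpre | hlsuf
              · have : ∃ b, (pvAdvance W cs h los best).1 = some b ∧ (W.getD h' 0 : Int) - 7 < b := by
                  rw [ha]; exact Or.inr ⟨l, by rw [hpre1]; exact List.mem_append_left _ hlpre, hpre2 l hlpre, by omega⟩
                rcases this with ⟨b0, hb0, ht0⟩
                exact Or.inl ⟨b0, hb0, by omega⟩
              · exact Or.inr ⟨l, hlsuf, hlh', hv⟩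

-- B's sorted position lists: membership and order
theorem mem_pos_list (cs : List Char) (words : List String) (p : Nat) :
    p ∈ PySem.List.sorted (PySem.Set.ofList (words.flatMap (fun t => pvOccsGo cs t.toList 0))) (fun x => x) false ↔
      pvOccP cs words p := by
  rw [PySem.List.mem_sorted, PySem.Set.mem_ofList, List.mem_flatMap]
  unfold pvOccP
  constructor
  · rintro ⟨t, ht, hp⟩
    rw [mem_pvOccsGo] at hp
    exact ⟨t, ht, hp.2.1, hp.2.2⟩
  · rintro ⟨t, ht, h1, h2⟩
    exact ⟨t, ht, (mem_pvOccsGo cs t.toList 0 p).mpr ⟨Nat.zero_le _, h1, h2⟩⟩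

theorem pos_list_sorted (cs : List Char) (words : List String) :
    (PySem.List.sorted (PySem.Set.ofList (words.flatMap (fun t => pvOccsGo cs t.toList 0))) (fun x => x) false).Pairwise (· ≤ ·) := by
  exact (PySem.List.sorted_ofList_pairwise_lt _).imp (fun h => le_of_lt h)

theorem pvClosePair_iff (cs : List Char) (los his : List Nat)
    (hlos : los.Pairwise (· ≤ ·)) (hhis : his.Pairwise (· ≤ ·))
    (hlb : ∀ l ∈ los, l < cs.length) (hhb : ∀ h ∈ his, h < cs.length) :
    (pvClosePair (pvW cs) cs los his = true ↔ ∃ l ∈ los, ∃ h ∈ his, l ≤ h ∧ pvQ cs l h) := by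
  unfold pvClosePair
  rw [pvCloseGo_spec (pvW cs) cs los none his hlos hhis]
  constructor
  · rintro ⟨h, hh, ⟨b, hb, -⟩ | ⟨l, hl, hlh, hv⟩⟩
    · exact absurd hb (by simp)
    · refine ⟨l, hl, h, hh, hlh, ?_⟩
      unfold pvQ
      rw [← pvW_getD cs l (le_of_lt (hlb l hl)), ← pvW_getD cs h (le_of_lt (hhb h hh))]
      exact hv
  · rintro ⟨l, hl, h, hh, hlh, hq⟩
    refine ⟨h, hh, Or.inr ⟨l, hl, hlh, ?_⟩⟩
    unfold pvQ at hq
    rw [← pvW_getD cs l (le_of_lt (hlb l hl)), ← pvW_getD cs h (le_of_lt (hhb h hh))] at hq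
    exact hq

-- A's index lists: membership
theorem mem_indices_guarded (terms : List String) (cs : List Char) (i : Int) :
    (i ∈ terms.foldl (fun acc term =>
      if PySem.Chars.isIn term.toList cs then
        acc ++ (PySem.List.pyRange 0 (cs.length : Int) 1).filter (fun j => pvStartsAt cs term.toList j)
      else acc) []) ↔ (0 ≤ i ∧ i < (cs.length : Int) ∧ pvOccP cs terms i.toNat) := by
  rw [PySem.List.foldl_congr_mem terms _
    (fun acc term => acc ++ (if PySem.Chars.isIn term.toList cs then
      (PySem.List.pyRange 0 (cs.length : Int) 1).filter (fun j => pvStartsAt cs term.toList j) else [])) []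
    (by intro acc t ht; by_cases hg : PySem.Chars.isIn t.toList cs = true <;> simp [hg])]
  rw [PySem.List.foldl_append_eq_flatMap, List.nil_append, List.mem_flatMap]
  unfold pvOccP
  constructor
  · rintro ⟨t, ht, hi⟩
    by_cases hg : PySem.Chars.isIn t.toList cs = true
    · rw [if_pos hg, List.mem_filter, PySem.List.mem_pyRange_one] at hi
      obtain ⟨⟨h0, hlen⟩, hsw⟩ := hi
      unfold pvStartsAt at hsw
      rw [PySem.Chars.startswith_iff] at hsw
      exact ⟨h0, hlen, t, ht, by omega, hsw⟩
    · rw [if_neg hg] at hi; simp at hi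
  · rintro ⟨h0, hlen, t, ht, hplen, hpre⟩
    refine ⟨t, ht, ?_⟩
    have hg : PySem.Chars.isIn t.toList cs = true :=
      (PySem.Chars.exists_prefix_drop_iff_isIn t.toList cs).mp ⟨i.toNat, hpre⟩
    rw [if_pos hg, List.mem_filter, PySem.List.mem_pyRange_one]
    refine ⟨⟨h0, hlen⟩, ?_⟩
    unfold pvStartsAt
    rw [PySem.Chars.startswith_iff]
    exact hpre

theorem mem_indices_plain (words : List String) (cs : List Char) (i : Int) :
    (i ∈ words.foldl (fun acc ing =>
      acc ++ (PySem.List.pyRange 0 (cs.length : Int) 1).filter (fun j => pvStartsAt cs ing.toList j)) []) ↔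
      (0 ≤ i ∧ i < (cs.length : Int) ∧ pvOccP cs words i.toNat) := by
  rw [PySem.List.foldl_append_eq_flatMap, List.nil_append, List.mem_flatMap]
  unfold pvOccP
  constructor
  · rintro ⟨t, ht, hi⟩
    rw [List.mem_filter, PySem.List.mem_pyRange_one] at hi
    obtain ⟨⟨h0, hlen⟩, hsw⟩ := hi
    unfold pvStartsAt at hsw
    rw [PySem.Chars.startswith_iff] at hsw
    exact ⟨h0, hlen, t, ht, by omega, hsw⟩
  · rintro ⟨h0, hlen, t, ht, hplen, hpre⟩
    refine ⟨t, ht, ?_⟩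
    rw [List.mem_filter, PySem.List.mem_pyRange_one]
    refine ⟨⟨h0, hlen⟩, ?_⟩
    unfold pvStartsAt
    rw [PySem.Chars.startswith_iff]
    exact hpre

-- A's pair condition for in-range indices equals pvQ on min/max
theorem A_cond_iff (cs : List Char) (i1 i2 : Int) (h1 : 0 ≤ i1) (h1' : i1 < (cs.length : Int))
    (h2 : 0 ≤ i2) (h2' : i2 < (cs.length : Int)) :
    ((PySem.Chars.split₀ (PySem.List.slice cs (some (min i1 i2)) (some (max i1 i2)))).length < 7 ↔
      pvQ cs (min i1.toNat i2.toNat) (max i1.toNat i2.toNat)) := by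
  have hmin : (0:Int) ≤ min i1 i2 := le_min h1 h2
  have hmax : (0:Int) ≤ max i1 i2 := le_trans h1 (le_max_left _ _)
  rw [PySem.List.slice_toNat cs hmin hmax]
  have e1 : (min i1 i2).toNat = min i1.toNat i2.toNat := by omega
  have e2 : (max i1 i2).toNat = max i1.toNat i2.toNat := by omega
  rw [e1, e2]
  exact cond_iff_Q cs _ _ (by omega) (by omega)

-- ===== VERDICT (by name: the statement is the Claim_ definition above) =====
theorem find_distance_to_substitution_spec : Claim_equal_find_distance_to_substitution := by
  unfold Claim_equal_find_distance_to_substitution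
  intro text ingredient_words substitution_terms _
  unfold Spec_find_distance_to_substitution
  rw [Bool.eq_iff_iff]
  unfold find_distance_to_substitution find_distance_to_substitution_alt
  simp only [List.any_eq_true, Bool.or_eq_true, decide_eq_true_iff]
  set cs := PySem.Chars.strip text.toList with hcs
  set S := PySem.List.sorted (PySem.Set.ofList (substitution_terms.flatMap (fun t => pvOccsGo cs t.toList 0))) (fun x => x) false with hS
  set I := PySem.List.sorted (PySem.Set.ofList (ingredient_words.flatMap (fun w => pvOccsGo cs w.toList 0))) (fun x => x) false with hI
  have hSs := pos_list_sorted cs substitution_terms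
  have hIs := pos_list_sorted cs ingredient_words
  have hSb : ∀ l ∈ S, l < cs.length := by
    intro l hl; rw [hS, mem_pos_list] at hl; exact hl.choose_spec.2.1
  have hIb : ∀ l ∈ I, l < cs.length := by
    intro l hl; rw [hI, mem_pos_list] at hl; exact hl.choose_spec.2.1
  rw [pvClosePair_iff cs S I hSs hIs hSb hIb, pvClosePair_iff cs I S hIs hSs hIb hSb]
  constructor
  · rintro ⟨i1, hi1, i2, hi2, hcond⟩
    rw [mem_indices_guarded] at hi1
    rw [mem_indices_plain] at hi2
    obtain ⟨h10, h1len, hocc1⟩ := hi1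
    obtain ⟨h20, h2len, hocc2⟩ := hi2
    rw [A_cond_iff cs i1 i2 h10 h1len h20 h2len] at hcond
    rcases le_total i1.toNat i2.toNat with hle | hle
    · left
      refine ⟨i1.toNat, ?_, i2.toNat, ?_, hle, ?_⟩
      · rw [hS, mem_pos_list]; exact hocc1
      · rw [hI, mem_pos_list]; exact hocc2
      · rwa [Nat.min_eq_left hle, Nat.max_eq_right hle] at hcond
    · right
      refine ⟨i2.toNat, ?_, i1.toNat, ?_, hle, ?_⟩
      · rw [hI, mem_pos_list]; exact hocc2
      · rw [hS, mem_pos_list]; exact hocc1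
      · rwa [Nat.min_eq_right hle, Nat.max_eq_left hle] at hcond
  · rintro (⟨l, hl, h, hh, hlh, hq⟩ | ⟨l, hl, h, hh, hlh, hq⟩)
    · rw [hS, mem_pos_list] at hl
      rw [hI, mem_pos_list] at hh
      refine ⟨(l : Int), ?_, (h : Int), ?_, ?_⟩
      · rw [mem_indices_guarded]
        refine ⟨by omega, ?_, by simpa using hl⟩
        have := hl.choose_spec.2.1; omega
      · rw [mem_indices_plain]
        refine ⟨by omega, ?_, by simpa using hh⟩
        have := hh.choose_spec.2.1; omega
      · rw [A_cond_iff cs _ _ (by omega) (by have := hl.choose_spec.2.1; omega) (by omega) (by have := hh.choose_spec.2.1; omega)]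
        simp only [Int.toNat_natCast]
        rwa [Nat.min_eq_left hlh, Nat.max_eq_right hlh]
    · rw [hI, mem_pos_list] at hl
      rw [hS, mem_pos_list] at hh
      refine ⟨(h : Int), ?_, (l : Int), ?_, ?_⟩
      · rw [mem_indices_guarded]
        refine ⟨by omega, ?_, by simpa using hh⟩
        have := hh.choose_spec.2.1; omega
      · rw [mem_indices_plain]
        refine ⟨by omega, ?_, by simpa using hl⟩
        have := hl.choose_spec.2.1; omega
      · rw [A_cond_iff cs _ _ (by omega) (by have := hh.choose_spec.2.1; omega) (by omega) (by have := hl.choose_spec.2.1; omega)]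
        simp only [Int.toNat_natCast]
        rwa [Nat.min_eq_right hlh, Nat.max_eq_left hlh]
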